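-- pv_equiv track=rewrite | github.com/holland11/school-projects | csc361_networks/a1_http_client/SmartClient.py | truncate_hostname
-- ===== SOURCE A (Python) =====
-- def truncate_hostname(hostname):
-- 	if (hostname[:7] == "http://"):
-- 		return truncate_hostname(hostname[7:])
-- 	if (hostname[:8] == "https://"):
-- 		return truncate_hostname(hostname[8:])
-- 	if (hostname[:3] == "www"):
-- 		return hostname
-- 	else:
-- 		return "www."+hostname
-- ===== SOURCE B (Python) =====
-- def truncate_hostname(hostname):
--     # iterative (while-loop) version: peel scheme prefixes, then prepend www once
--     while True:
--         if hostname.startswith("http://"):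
--             hostname = hostname[7:]
--         elif hostname.startswith("https://"):
--             hostname = hostname[8:]
--         else:
--             break
--     return hostname if hostname.startswith("www") else "www." + hostname
-- ===== Notes on version B (the rewrite author's own statement) =====
-- stated objective: idiomatic
-- what changed: Replaced the self-recursion with an explicit while loop that peels scheme prefixes (via startswith instead of slice comparison), with the www-prepending done once after the loop instead of inside each recursive return.
import Mathlib
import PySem

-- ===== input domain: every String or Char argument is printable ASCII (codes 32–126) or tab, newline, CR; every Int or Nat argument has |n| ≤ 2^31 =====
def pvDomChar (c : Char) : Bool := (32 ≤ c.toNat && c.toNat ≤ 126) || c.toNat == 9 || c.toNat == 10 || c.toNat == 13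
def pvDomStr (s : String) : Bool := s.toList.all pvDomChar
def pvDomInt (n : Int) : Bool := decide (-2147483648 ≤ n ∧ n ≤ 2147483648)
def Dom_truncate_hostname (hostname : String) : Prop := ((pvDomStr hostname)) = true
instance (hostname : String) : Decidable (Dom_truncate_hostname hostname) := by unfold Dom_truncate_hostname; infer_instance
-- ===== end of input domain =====

-- B rewrites A's self-recursion as an explicit peeling loop plus one final www check (idiomatic, same cost).

-- ===== PORT A =====
-- A, on the character list: recursive, each branch returns from within the recursion.
def truncAuxA (cs : List Char) : List Char :=
  if h1 : PySem.List.slice cs none (some 7) = "http://".toList then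
    truncAuxA (PySem.List.slice cs (some 7) none)
  else if h2 : PySem.List.slice cs none (some 8) = "https://".toList then
    truncAuxA (PySem.List.slice cs (some 8) none)
  else if PySem.List.slice cs none (some 3) = "www".toList then cs
  else "www.".toList ++ cs
termination_by cs.length
decreasing_by
  · have hlen : 7 ≤ cs.length := by
      have := congrArg List.length h1
      rw [PySem.List.slice_to cs (by norm_num)] at this
      simp at this; omega
    rw [PySem.List.slice_from cs (by norm_num)]
    simp; omega
  · have hlen : 8 ≤ cs.length := by
      have := congrArg List.length h2
      rw [PySem.List.slice_to cs (by norm_num)] at this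
      simp at this; omega
    rw [PySem.List.slice_from cs (by norm_num)]
    simp; omega

def truncate_hostname (hostname : String) : String :=
  String.ofList (truncAuxA hostname.toList)

-- ===== PORT B =====
-- B's loop: strip scheme prefixes until neither matches (tail-recursive = the while loop).
def stripSchemes (cs : List Char) : List Char :=
  if h1 : PySem.Chars.startswith cs "http://".toList then stripSchemes (cs.drop 7)
  else if h2 : PySem.Chars.startswith cs "https://".toList then stripSchemes (cs.drop 8)
  else cs
termination_by cs.length
decreasing_by
  · have := (PySem.Chars.startswith_iff _ _).mp h1
    have := this.length_le
    simp at this ⊢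
    omega
  · have := (PySem.Chars.startswith_iff _ _).mp h2
    have := this.length_le
    simp at this ⊢
    omega

def truncate_hostname_alt (hostname : String) : String :=
  let r := stripSchemes hostname.toList
  if PySem.Chars.startswith r "www".toList then String.ofList r
  else String.ofList ("www.".toList ++ r)

-- ===== PRECONDITION & SPEC =====
def Spec_truncate_hostname (hostname : String) (out : String) : Prop := out = truncate_hostname_alt hostname
instance (hostname : String) (out : String) : Decidable (Spec_truncate_hostname hostname out) := by unfold Spec_truncate_hostname; infer_instance

-- ===== CLAIM (what is proved, stated in full; the proofs are below) =====
def Claim_equal_truncate_hostname : Prop := ∀ (hostname : String), Dom_truncate_hostname hostname → Spec_truncate_hostname hostname (truncate_hostname hostname)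

-- ===== LEMMAS AND PROOFS =====

-- a slice-prefix comparison is a startswith test (p of the matching length)
theorem slice_eq_iff_startswith (cs p : List Char) (b : Int) (hb : 0 ≤ b)
    (hn : p.length = b.toNat) :
    PySem.List.slice cs none (some b) = p ↔ PySem.Chars.startswith cs p = true := by
  rw [PySem.Chars.startswith_iff, PySem.List.slice_to cs hb, List.prefix_iff_eq_take, ← hn]
  exact eq_comm

theorem truncAuxA_eq (cs : List Char) :
    truncAuxA cs =
      (if PySem.Chars.startswith (stripSchemes cs) "www".toList then stripSchemes cs
       else "www.".toList ++ stripSchemes cs) := by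
  fun_induction truncAuxA cs with
  | case1 cs h1 ih =>
      rw [slice_eq_iff_startswith cs _ 7 (by norm_num) rfl] at h1
      rw [PySem.List.slice_from cs (by norm_num)] at ih ⊢
      conv_rhs => rw [stripSchemes]
      rw [dif_pos h1]
      simpa using ih
  | case2 cs h1 h2 ih =>
      rw [slice_eq_iff_startswith cs _ 7 (by norm_num) rfl] at h1
      rw [slice_eq_iff_startswith cs _ 8 (by norm_num) rfl] at h2
      rw [PySem.List.slice_from cs (by norm_num)] at ih ⊢
      conv_rhs => rw [stripSchemes]
      rw [dif_neg h1, dif_pos h2]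
      simpa using ih
  | case3 cs h1 h2 h3 =>
      rw [slice_eq_iff_startswith cs _ 7 (by norm_num) rfl] at h1
      rw [slice_eq_iff_startswith cs _ 8 (by norm_num) rfl] at h2
      rw [slice_eq_iff_startswith cs _ 3 (by norm_num) rfl] at h3
      conv_rhs => rw [stripSchemes]
      rw [dif_neg h1, dif_neg h2, if_pos h3]
  | case4 cs h1 h2 h3 =>
      rw [slice_eq_iff_startswith cs _ 7 (by norm_num) rfl] at h1
      rw [slice_eq_iff_startswith cs _ 8 (by norm_num) rfl] at h2
      rw [slice_eq_iff_startswith cs _ 3 (by norm_num) rfl] at h3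
      conv_rhs => rw [stripSchemes]
      rw [dif_neg h1, dif_neg h2, if_neg h3]

-- ===== VERDICT (by name: the statement is the Claim_ definition above) =====
theorem truncate_hostname_spec : Claim_equal_truncate_hostname := by
  intro hostname _
  unfold Spec_truncate_hostname truncate_hostname truncate_hostname_alt
  rw [truncAuxA_eq, apply_ite String.ofList]
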